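-- pv_equiv track=rewrite | github.com/masneyb/shotwell-site-generator | utils/rename_media.py | cleanup_tags
-- ===== SOURCE A (Python) =====
-- def cleanup_tags(tags):
--     tags.sort()
--
--     new_tags = []
--     for tag in tags:
--         found_prefix = False
--         for check_tag in tags:
--             if check_tag != tag and check_tag.startswith(tag):
--                 found_prefix = True
--                 break
--
--         if not found_prefix:
--             new_tags.append(tag)
--
--     return new_tags
-- ===== SOURCE B (Python) =====
-- def cleanup_tags(tags):
--     # Sort once, then group equal tags; a tag is a proper prefix of another
--     # tag iff it is a prefix of the next distinct tag in sorted order.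
--     tags.sort()
--     out = []
--     i = 0
--     n = len(tags)
--     while i < n:
--         t = tags[i]
--         j = i
--         while j < n and tags[j] == t:
--             j += 1
--         if j == n or not tags[j].startswith(t):
--             out.extend(tags[i:j])
--         i = j
--     return out
-- ===== Notes on version B (the rewrite author's own statement) =====
-- stated objective: faster
-- what changed: B replaces A's quadratic all-pairs startswith scan by a single pass over the sorted list that compares each group of equal tags only with the next distinct tag (proper prefixes form a contiguous block after sorting).
import Mathlib
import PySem

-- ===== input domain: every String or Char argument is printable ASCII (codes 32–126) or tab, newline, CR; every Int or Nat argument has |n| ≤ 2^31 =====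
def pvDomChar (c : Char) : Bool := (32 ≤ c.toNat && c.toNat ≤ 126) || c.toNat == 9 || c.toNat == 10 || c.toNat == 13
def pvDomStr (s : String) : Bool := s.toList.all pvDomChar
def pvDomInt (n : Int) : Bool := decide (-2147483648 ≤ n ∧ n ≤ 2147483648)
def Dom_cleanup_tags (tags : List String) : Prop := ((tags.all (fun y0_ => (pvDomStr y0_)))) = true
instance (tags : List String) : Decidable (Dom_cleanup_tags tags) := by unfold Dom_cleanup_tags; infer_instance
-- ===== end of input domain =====

-- B replaces A's quadratic all-pairs prefix scan by a single pass over the sorted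
-- list that compares each group of equal tags only with the next distinct tag.
-- A sorts `tags` in place; the equivalence proved here is about the return value
-- (B performs the same in-place sort).

-- ===== PORT A =====
def cleanup_tags (tags : List String) : List String :=
  let ts := PySem.List.sorted tags (fun x => x) false
  ts.foldl (fun new_tags tag =>
    let found_prefix := ts.any (fun check_tag =>
      check_tag != tag && PySem.Str.startswith check_tag tag)
    if found_prefix then new_tags else new_tags ++ [tag]) []

-- ===== PORT B =====
-- outer while-loop of Source B: one step per group of equal tags; the inner
-- while-loop (advance j over the duplicates of t) is takeWhile/dropWhile
def cleanupGroups : List String → List String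
  | [] => []
  | t :: rest =>
    let run := rest.takeWhile (fun x => x == t)
    match hr : rest.dropWhile (fun x => x == t) with
    | [] => t :: run
    | nxt :: tl =>
      if PySem.Str.startswith nxt t then cleanupGroups (nxt :: tl)
      else (t :: run) ++ cleanupGroups (nxt :: tl)
termination_by l => l.length
decreasing_by
  all_goals
    have h := List.length_dropWhile_le (fun x => x == t) rest
    rw [hr] at h
    simp only [List.length_cons] at h ⊢
    omega

def cleanup_tags_alt (tags : List String) : List String :=
  cleanupGroups (PySem.List.sorted tags (fun x => x) false)

-- ===== PRECONDITION & SPEC =====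
def Spec_cleanup_tags (tags : List String) (out : List String) : Prop := out = cleanup_tags_alt tags
instance (tags : List String) (out : List String) : Decidable (Spec_cleanup_tags tags out) := by unfold Spec_cleanup_tags; infer_instance

-- ===== CLAIM (what is proved, stated in full; the proofs are below) =====
def Claim_equal_cleanup_tags : Prop := ∀ (tags : List String), Dom_cleanup_tags tags → Spec_cleanup_tags tags (cleanup_tags tags)

-- ===== LEMMAS AND PROOFS =====

-- A's foldl is a filter
lemma cleanup_tags_eq_filter (s : List String) :
    s.foldl (fun new_tags tag =>
      if s.any (fun check_tag => check_tag != tag && PySem.Str.startswith check_tag tag)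
      then new_tags else new_tags ++ [tag]) []
    = s.filter (fun tag =>
        !(s.any (fun check_tag => check_tag != tag && PySem.Str.startswith check_tag tag))) := by
  have hfun : (fun (new_tags : List String) tag =>
      if s.any (fun check_tag => check_tag != tag && PySem.Str.startswith check_tag tag)
      then new_tags else new_tags ++ [tag])
    = (fun (new_tags : List String) tag =>
      if (!(s.any (fun check_tag => check_tag != tag && PySem.Str.startswith check_tag tag))) = true
      then new_tags ++ [tag] else new_tags) := by
    funext acc tag
    cases h : s.any (fun check_tag => check_tag != tag && PySem.Str.startswith check_tag tag) <;>
      simp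
  rw [hfun, PySem.List.foldl_append_if_eq_filter]
  simp

-- lex order on List Char: small facts
lemma charlist_nil_le (x : List Char) : ([] : List Char) ≤ x := by
  cases x with
  | nil => exact le_rfl
  | cons a t => exact le_of_lt List.Lex.nil

lemma charlist_not_cons_le_nil (a : Char) (x : List Char) : ¬ (a :: x) ≤ ([] : List Char) := by
  intro h
  rcases lt_or_eq_of_le h with h | h
  · cases h
  · simp at h

lemma charlist_cons_le_cons (a : Char) (x y : List Char) : (a :: x) ≤ (a :: y) ↔ x ≤ y := by
  constructor
  · intro h
    rcases lt_or_eq_of_le h with h | h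
    · rcases List.cons_lt_cons_iff.mp h with h | ⟨_, h⟩
      · exact absurd h (lt_irrefl a)
      · exact le_of_lt h
    · injection h with _ h
      exact le_of_eq h
  · intro h
    rcases lt_or_eq_of_le h with h | h
    · exact le_of_lt (List.cons_lt_cons_iff.mpr (Or.inr ⟨rfl, h⟩))
    · subst h; exact le_rfl

lemma charlist_head_le (a b : Char) (x y : List Char) (h : (a :: x) ≤ (b :: y)) : a ≤ b := by
  rcases lt_or_eq_of_le h with h | h
  · rcases List.cons_lt_cons_iff.mp h with h | ⟨h, _⟩
    · exact le_of_lt h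
    · exact le_of_eq h
  · injection h with h _
    exact le_of_eq h

lemma charlist_prefix_le (p c : List Char) (h : p <+: c) : p ≤ c := by
  obtain ⟨t, rfl⟩ := h
  induction p with
  | nil => exact charlist_nil_le t
  | cons a p ih => exact (charlist_cons_le_cons a p (p ++ t)).mpr ih

-- strings with a common prefix p form an interval in lex order
lemma charlist_prefix_interval :
    ∀ (p u c : List Char), p ≤ u → u ≤ c → p <+: c → p <+: u := by
  intro p
  induction p with
  | nil => intro u c _ _ _; exact List.nil_prefix
  | cons a p ih =>
    intro u c h1 h2 hp
    obtain ⟨c', rfl, hpc⟩ := List.cons_prefix_iff.mp hp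
    cases u with
    | nil => exact absurd h1 (charlist_not_cons_le_nil a p)
    | cons b u' =>
      have hab : a = b := le_antisymm (charlist_head_le a b p u' h1) (charlist_head_le b a u' c' h2)
      subst hab
      have h1' : p ≤ u' := (charlist_cons_le_cons a p u').mp h1
      have h2' : u' ≤ c' := (charlist_cons_le_cons a u' c').mp h2
      exact List.cons_prefix_cons.mpr ⟨rfl, ih u' c' h1' h2' hpc⟩

lemma sw_iff (c t : String) : PySem.Str.startswith c t = true ↔ t.toList <+: c.toList := by
  rw [PySem.Str.startswith_eq]
  exact PySem.Chars.startswith_iff c.toList t.toList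

lemma le_of_sw (c t : String) (h : PySem.Str.startswith c t = true) : t ≤ c := by
  rw [String.le_iff_toList_le]
  exact charlist_prefix_le _ _ ((sw_iff c t).mp h)

lemma sw_interval (t u c : String) (h1 : t ≤ u) (h2 : u ≤ c)
    (h : PySem.Str.startswith c t = true) : PySem.Str.startswith u t = true := by
  rw [sw_iff] at h ⊢
  exact charlist_prefix_interval t.toList u.toList c.toList
    (String.le_iff_toList_le.mp h1) (String.le_iff_toList_le.mp h2) h

-- the main invariant: on a sorted list, A's filter is B's grouped single pass
lemma filter_eq_cleanupGroups :
    ∀ (n : ℕ) (s : List String), s.length ≤ n → s.Pairwise (· ≤ ·) →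
      s.filter (fun tag =>
        !(s.any (fun check_tag => check_tag != tag && PySem.Str.startswith check_tag tag)))
      = cleanupGroups s := by
  intro n
  induction n with
  | zero =>
    intro s hlen _
    have : s = [] := List.eq_nil_of_length_eq_zero (Nat.le_zero.mp hlen)
    subst this
    simp [cleanupGroups]
  | succ n ih =>
    intro s hlen hsort
    cases s with
    | nil => simp [cleanupGroups]
    | cons t rest =>
      rw [List.pairwise_cons] at hsort
      obtain ⟨hts, hsr⟩ := hsort
      have hsplit : rest.takeWhile (fun x => x == t) ++ rest.dropWhile (fun x => x == t) = rest :=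
        List.takeWhile_append_dropWhile
      have hrun : ∀ x ∈ rest.takeWhile (fun x => x == t), x = t := by
        intro x hx
        have := List.mem_takeWhile_imp hx
        simpa using this
      cases hr : rest.dropWhile (fun x => x == t) with
      | nil =>
        -- every element of s equals t: nothing is a proper prefix of anything
        have hall : ∀ x ∈ t :: rest, x = t := by
          intro x hx
          rcases List.mem_cons.mp hx with rfl | hx
          · rfl
          · rw [← hsplit, hr, List.append_nil] at hx
            exact hrun x hx
        have hnone : ∀ tag ∈ t :: rest,
            (!(( t :: rest).any (fun c => c != tag && PySem.Str.startswith c tag))) = true := by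
          intro tag htag
          rw [hall tag htag]
          simp only [Bool.not_eq_true', List.any_eq_false]
          intro c hc
          rw [hall c hc]
          simp
        rw [List.filter_eq_self.mpr hnone]
        have hB : cleanupGroups (t :: rest) = t :: rest.takeWhile (fun x => x == t) := by
          rw [cleanupGroups.eq_2]
          split
          · rfl
          · next a b heq => rw [hr] at heq; cases heq
        rw [hB]
        have hre : rest = rest.takeWhile (fun x => x == t) := by
          conv_lhs => rw [← hsplit, hr, List.append_nil]
        rw [← hre]
      | cons nxt tl =>
        have hne_nil : rest.dropWhile (fun x => x == t) ≠ [] := by rw [hr]; simp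
        have hnxt_ne : nxt ≠ t := by
          have := List.head_dropWhile_not (fun x => x == t) hne_nil
          revert this
          simp only [hr, List.head_cons]
          intro h
          simpa using h
        have hnxt_mem : nxt ∈ rest :=
          (List.dropWhile_sublist _).subset (by rw [hr]; simp)
        have ht_lt : t < nxt := lt_of_le_of_ne (hts nxt hnxt_mem) (Ne.symm hnxt_ne)
        have hrest'_sorted : (nxt :: tl).Pairwise (· ≤ ·) := by
          rw [← hr]; exact List.Pairwise.sublist (List.dropWhile_sublist _) hsr
        have hge_nxt : ∀ y ∈ nxt :: tl, nxt ≤ y := by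
          intro y hy
          rcases List.mem_cons.mp hy with rfl | hy
          · exact le_rfl
          · exact (List.pairwise_cons.mp hrest'_sorted).1 y hy
        -- unfold B's step before abstracting the run of duplicates
        have hB : cleanupGroups (t :: rest)
            = if PySem.Str.startswith nxt t then cleanupGroups (nxt :: tl)
              else (t :: rest.takeWhile (fun x => x == t)) ++ cleanupGroups (nxt :: tl) := by
          rw [cleanupGroups.eq_2]
          split
          · next heq => rw [hr] at heq; cases heq
          · next a b heq =>
            rw [hr] at heq
            cases heq
            rfl
        have hsplit2 : rest = rest.takeWhile (fun x => x == t) ++ nxt :: tl := by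
          conv_lhs => rw [← hsplit, hr]
        -- abstract the duplicate run
        obtain ⟨run, hgen⟩ : ∃ run, rest.takeWhile (fun x => x == t) = run := ⟨_, rfl⟩
        rw [hgen] at hrun hsplit2 hB
        clear hgen hsplit hr hne_nil
        subst hsplit2
        have ht_le_nxt : t ≤ nxt := le_of_lt ht_lt
        -- split the list under the filter
        rw [hB, ← List.cons_append, List.filter_append]
        -- the predicate at t (and at each duplicate of t in the run)
        have hmem_cases : ∀ c ∈ (t :: run) ++ nxt :: tl,
            c = t ∨ c ∈ run ∨ c ∈ nxt :: tl := by
          intro c hc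
          rcases List.mem_append.mp hc with hc | hc
          · rcases List.mem_cons.mp hc with rfl | hc
            · exact Or.inl rfl
            · exact Or.inr (Or.inl hc)
          · exact Or.inr (Or.inr hc)
        have hQt : ((t :: run) ++ nxt :: tl).any
              (fun c => c != t && PySem.Str.startswith c t)
            = PySem.Str.startswith nxt t := by
          cases hsw : PySem.Str.startswith nxt t with
          | false =>
            simp only [List.any_eq_false]
            intro c hc
            rcases hmem_cases c hc with rfl | hc | hc
            · simp
            · rw [hrun c hc]; simp
            · -- c ≥ nxt ≥ t; a prefix c of t here would force nxt to extend t
              simp only [Bool.and_eq_true, bne_iff_ne, ne_eq, not_and]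
              intro _ hswc
              have := sw_interval t nxt c ht_le_nxt (hge_nxt c hc) hswc
              rw [hsw] at this
              exact absurd this (by simp)
          | true =>
            simp only [List.any_eq_true]
            refine ⟨nxt, by simp, ?_⟩
            rw [hsw]
            simp [hnxt_ne]
        have hQrun : ∀ x ∈ run,
            ((t :: run) ++ nxt :: tl).any (fun c => c != x && PySem.Str.startswith c x)
              = PySem.Str.startswith nxt t := by
          intro x hx; rw [hrun x hx, hQt]
        -- on the tail group the global scan equals the local scan
        have hQrest' : ∀ x ∈ nxt :: tl,
            ((t :: run) ++ nxt :: tl).any (fun c => c != x && PySem.Str.startswith c x)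
              = (nxt :: tl).any (fun c => c != x && PySem.Str.startswith c x) := by
          intro x hx
          have ht_lt_x : t < x := lt_of_lt_of_le ht_lt (hge_nxt x hx)
          have hQxt : ∀ c ∈ t :: run, ¬ (c != x && PySem.Str.startswith c x) = true := by
            intro c hc
            have hc_eq : c = t := by
              rcases List.mem_cons.mp hc with rfl | hc
              · rfl
              · exact hrun c hc
            subst hc_eq
            cases hswc : PySem.Str.startswith c x with
            | false => simp
            | true => exact absurd (le_of_sw c x hswc) (not_le.mpr ht_lt_x)
          rw [List.any_append, List.any_eq_false.mpr hQxt]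
          simp
        -- length bound for the recursive call
        have hlen' : (nxt :: tl).length ≤ n := by
          simp only [List.length_cons, List.length_append] at hlen ⊢
          omega
        have hIH := ih (nxt :: tl) hlen' hrest'_sorted
        have hfilter2 : List.filter (fun tag =>
              !(((t :: run) ++ nxt :: tl).any
                (fun check_tag => check_tag != tag && PySem.Str.startswith check_tag tag)))
              (nxt :: tl)
            = List.filter (fun tag =>
              !((nxt :: tl).any
                (fun check_tag => check_tag != tag && PySem.Str.startswith check_tag tag)))
              (nxt :: tl) :=
          List.filter_congr (fun x hx => by rw [hQrest' x hx])
        rw [hfilter2, hIH]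
        cases hsw : PySem.Str.startswith nxt t with
        | true =>
          rw [List.filter_eq_nil_iff.mpr ?_]
          · simp
          · intro a ha
            rcases List.mem_cons.mp ha with rfl | ha
            · rw [Bool.not_eq_true', hQt, hsw]; simp
            · rw [Bool.not_eq_true', hQrun a ha, hsw]; simp
        | false =>
          rw [List.filter_eq_self.mpr ?_]
          · simp
          · intro a ha
            rcases List.mem_cons.mp ha with rfl | ha
            · rw [hQt, hsw]; rfl
            · rw [hQrun a ha, hsw]; rfl

-- ===== VERDICT (by name: the statement is the Claim_ definition above) =====
theorem cleanup_tags_spec : Claim_equal_cleanup_tags := by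
  intro tags _
  show cleanup_tags tags = cleanup_tags_alt tags
  unfold cleanup_tags cleanup_tags_alt
  rw [cleanup_tags_eq_filter]
  exact filter_eq_cleanupGroups (PySem.List.sorted tags (fun x => x) false).length _ le_rfl
    (PySem.List.sorted_pairwise tags (fun x => x))
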